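-- pv_equiv track=rewrite | github.com/Rlynette/GenAI-Lab | py_module/docgen.py | _group_nodes_by_module
-- ===== SOURCE A (Python) =====
-- from typing import Dict, List
--
-- def _group_nodes_by_module(nodes: List[str]) -> Dict[str, List[str]]:
--     groups = {}
--     for n in nodes:
--         if "." in n:
--             mod, name = n.rsplit(".", 1)
--         else:
--             mod, name = "<root>", n
--         groups.setdefault(mod, []).append(name)
--     # sort names
--     for k in groups:
--         groups[k] = sorted(groups[k])
--     return dict(sorted(groups.items()))
-- ===== SOURCE B (Python) =====
-- def _split_key(n):
--     mod, dot, name = n.rpartition(".")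
--     return (mod, name) if dot else ("<root>", n)
--
-- def _group_nodes_by_module(nodes):
--     # one global sort of (module, name) pairs, then a single run-scan groups them
--     pairs = sorted(_split_key(n) for n in nodes)
--     result = {}
--     i = 0
--     while i < len(pairs):
--         mod = pairs[i][0]
--         j = i
--         while j < len(pairs) and pairs[j][0] == mod:
--             j += 1
--         result[mod] = [name for _, name in pairs[i:j]]
--         i = j
--     return result
-- ===== Notes on version B (the rewrite author's own statement) =====
-- stated objective: alternative
-- what changed: A builds a dict of groups first, then sorts each name list and finally sorts the items; B maps every node to a (module, name) pair, sorts that pair list once, and forms the groups by a single run-scan over the sorted pairs.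
import Mathlib
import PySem

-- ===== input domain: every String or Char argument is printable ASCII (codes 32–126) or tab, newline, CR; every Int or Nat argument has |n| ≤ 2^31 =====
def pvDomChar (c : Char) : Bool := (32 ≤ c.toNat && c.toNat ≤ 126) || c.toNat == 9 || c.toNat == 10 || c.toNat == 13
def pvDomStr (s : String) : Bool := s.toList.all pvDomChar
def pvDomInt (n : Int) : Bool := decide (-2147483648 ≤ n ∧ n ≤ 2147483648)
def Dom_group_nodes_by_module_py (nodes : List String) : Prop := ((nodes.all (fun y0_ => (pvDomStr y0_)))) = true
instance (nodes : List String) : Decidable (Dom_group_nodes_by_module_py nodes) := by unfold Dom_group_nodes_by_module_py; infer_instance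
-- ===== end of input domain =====

-- B replaces A's dict-then-sort-twice grouping by one global sort of (module, name) pairs followed by a run-scan (alternative decomposition, same cost).

-- ===== PORT A =====
-- '"." in n' → PySem.Str.isIn; n.rsplit(".", 1) ported by hand via rfind + slices
-- (exact for the 1-char separator "." with maxsplit 1: split at the highest occurrence of '.')
def pvSplitA (n : String) : String × String :=
  if PySem.Str.isIn "." n then
    (PySem.Str.slice n none (some (PySem.Str.rfind n ".")),
     PySem.Str.slice n (some (PySem.Str.rfind n "." + 1)) none)
  else ("<root>", n)

def group_nodes_by_module_py (nodes : List String) : List (String × List String) :=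
  -- groups.setdefault(mod, []).append(name) = groups[mod] = groups.get(mod, []) + [name] → Dict.modify
  let groups := nodes.foldl
    (fun d n => PySem.Dict.modify d (pvSplitA n).1 [] (fun v => v ++ [(pvSplitA n).2]))
    PySem.Dict.empty
  -- for k in groups: groups[k] = sorted(groups[k]) — overwriting an existing key keeps its position
  let groups2 := PySem.Dict.mk (groups.items.map (fun p => (p.1, PySem.List.sorted p.2 (fun x => x))))
  -- dict(sorted(groups.items())): dict keys are distinct, so sorting the item tuples = sorting by key
  PySem.List.sorted groups2.items (fun p => p.1)

-- ===== PORT B =====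
-- n.rpartition(".") with the '<root>' fallback collapsed: '.' present → split at its highest occurrence (rfind), else ("<root>", n)
def pvSplitB (n : String) : String × String :=
  if PySem.Str.isIn "." n then
    (PySem.Str.slice n none (some (PySem.Str.rfind n ".")),
     PySem.Str.slice n (some (PySem.Str.rfind n "." + 1)) none)
  else ("<root>", n)

-- the index run-scan 'while j < len(pairs) and pairs[j][0] == mod' ported as takeWhile/dropWhile recursion on the sorted suffix
def pvRuns : List (String × String) → List (String × List String)
  | [] => []
  | p :: rest =>
      (p.1, p.2 :: (rest.takeWhile (fun q => q.1 == p.1)).map (fun q => q.2)) ::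
        pvRuns (rest.dropWhile (fun q => q.1 == p.1))
termination_by l => l.length
decreasing_by
  have := List.length_dropWhile_le (fun q => q.1 == p.1) rest
  simp only [List.length_cons]
  omega

def group_nodes_by_module_py_alt (nodes : List String) : List (String × List String) :=
  pvRuns (PySem.List.sorted2 (nodes.map pvSplitB) (fun p => p.1) (fun p => p.2))

-- ===== PRECONDITION & SPEC =====
def Spec_group_nodes_by_module_py (nodes : List String) (out : List (String × List String)) : Prop := out = group_nodes_by_module_py_alt nodes
instance (nodes : List String) (out : List (String × List String)) : Decidable (Spec_group_nodes_by_module_py nodes out) := by unfold Spec_group_nodes_by_module_py; infer_instance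

-- ===== CLAIM (what is proved, stated in full; the proofs are below) =====
def Claim_equal_group_nodes_by_module_py : Prop := ∀ (nodes : List String), Dom_group_nodes_by_module_py nodes → Spec_group_nodes_by_module_py nodes (group_nodes_by_module_py nodes)

-- ===== LEMMAS AND PROOFS =====

-- the two split helpers are the same function
theorem pvSplitB_eq : pvSplitB = pvSplitA := rfl

-- strict lexicographic "before" used by sorted2 on (module, name) pairs, and its non-strict negation
def pvBlt (a b : String × String) : Bool :=
  decide (a.1 < b.1) || (!decide (b.1 < a.1) && decide (a.2 < b.2))

def pvLexLe (a b : String × String) : Prop := a.1 < b.1 ∨ (a.1 = b.1 ∧ a.2 ≤ b.2)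

theorem pvBlt_false_iff (a b : String × String) : pvBlt b a = false ↔ pvLexLe a b := by
  simp only [pvBlt, pvLexLe, Bool.or_eq_false_iff, Bool.and_eq_false_iff,
    Bool.not_eq_false', decide_eq_false_iff_not, decide_eq_true_eq, not_lt]
  constructor
  · rintro ⟨h1, h2 | h2⟩
    · exact Or.inl h2
    · rcases lt_or_eq_of_le h1 with h | h
      · exact Or.inl h
      · exact Or.inr ⟨h, h2⟩
  · rintro (h | ⟨h1, h2⟩)
    · exact ⟨le_of_lt h, Or.inl h⟩
    · exact ⟨le_of_eq h1, Or.inr h2⟩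

theorem pvBlt_trans {a b c : String × String} :
    pvBlt a b = true → pvBlt b c = true → pvBlt a c = true := by
  simp only [pvBlt, Bool.or_eq_true, Bool.and_eq_true, Bool.not_eq_true',
    decide_eq_true_eq, decide_eq_false_iff_not, not_lt]
  rintro (h1 | ⟨h1, h1'⟩) (h2 | ⟨h2, h2'⟩)
  · exact Or.inl (lt_trans h1 h2)
  · exact Or.inl (lt_of_lt_of_le h1 h2)
  · exact Or.inl (lt_of_le_of_lt h1 h2)
  · exact Or.inr ⟨le_trans h1 h2, lt_trans h1' h2'⟩

theorem pvBlt_asymm {a b : String × String} : pvBlt a b = true → pvBlt b a = false := by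
  simp only [pvBlt, Bool.or_eq_true, Bool.and_eq_true, Bool.not_eq_true', Bool.or_eq_false_iff,
    Bool.and_eq_false_iff, Bool.not_eq_false', decide_eq_true_eq, decide_eq_false_iff_not, not_lt]
  rintro (h | ⟨h1, h2⟩)
  · exact ⟨le_of_lt h, Or.inl h⟩
  · exact ⟨h1, Or.inr (le_of_lt h2)⟩

theorem pairwise_insertBy (x : String × String) :
    ∀ (ys : List (String × String)), ys.Pairwise (fun a b => pvBlt b a = false) →
      (PySem.List.insertBy pvBlt x ys).Pairwise (fun a b => pvBlt b a = false) := by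
  intro ys
  induction ys with
  | nil => intro _; simp [PySem.List.insertBy]
  | cons y ys ih =>
    intro h
    rw [List.pairwise_cons] at h
    obtain ⟨hy, hys⟩ := h
    by_cases hb : pvBlt x y = true
    · simp only [PySem.List.insertBy, hb, if_pos]
      refine List.Pairwise.cons ?_ (List.Pairwise.cons hy hys)
      intro z hz
      rcases List.mem_cons.mp hz with rfl | hz'
      · exact pvBlt_asymm hb
      · by_contra hc
        have hzx : pvBlt z x = true := by
          cases hzx : pvBlt z x with
          | false => exact absurd hzx hc
          | true => rfl
        have := pvBlt_trans hzx hb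
        rw [hy z hz'] at this
        exact Bool.false_ne_true this
    · have hb' : pvBlt x y = false := by
        cases hbb : pvBlt x y with
        | false => rfl
        | true => exact absurd hbb hb
      simp only [PySem.List.insertBy, hb', Bool.false_eq_true, if_neg, not_false_iff]
      refine List.Pairwise.cons ?_ (ih hys)
      intro z hz
      rcases (PySem.List.mem_insertBy pvBlt x z ys).mp hz with rfl | hz'
      · exact hb'
      · exact hy z hz'

theorem pairwise_foldl_insertBy :
    ∀ (l : List (String × String)) (acc : List (String × String)),
      acc.Pairwise (fun a b => pvBlt b a = false) →
      (l.foldl (fun acc x => PySem.List.insertBy pvBlt x acc) acc).Pairwise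
        (fun a b => pvBlt b a = false) := by
  intro l
  induction l with
  | nil => intro acc h; simpa using h
  | cons x xs ih =>
    intro acc h
    simpa using ih _ (pairwise_insertBy x acc h)

theorem sorted2_pairwise_lexle (P : List (String × String)) :
    (PySem.List.sorted2 P (fun p => p.1) (fun p => p.2)).Pairwise pvLexLe := by
  have heq : PySem.List.sorted2 P (fun p : String × String => p.1) (fun p => p.2)
      = P.foldl (fun acc x => PySem.List.insertBy pvBlt x acc) [] := rfl
  rw [heq]
  have h := pairwise_foldl_insertBy P [] (List.Pairwise.nil)
  exact h.imp (fun {a b} hab => (pvBlt_false_iff a b).mp hab)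

theorem fst_lt_of_mem_dropWhile (x : String) :
    ∀ (l : List (String × String)), (∀ q ∈ l, x ≤ q.1) → l.Pairwise pvLexLe →
      ∀ q ∈ l.dropWhile (fun q => q.1 == x), x < q.1 := by
  intro l
  induction l with
  | nil => intro _ _ q hq; simp at hq
  | cons a as ih =>
    intro hle hp q hq
    rw [List.pairwise_cons] at hp
    by_cases ha : (a.1 == x) = true
    · simp only [List.dropWhile_cons, ha, if_true] at hq
      exact ih (fun r hr => hle r (List.mem_cons_of_mem a hr)) hp.2 q hq
    · have ha' : (a.1 == x) = false := by
        cases hb : (a.1 == x) with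
        | false => rfl
        | true => exact absurd hb ha
      simp only [List.dropWhile_cons, ha'] at hq
      have hxa : x < a.1 := by
        have h1 := hle a (List.mem_cons_self)
        have h2 : a.1 ≠ x := by simpa using ha'
        exact lt_of_le_of_ne h1 (Ne.symm h2)
      rcases List.mem_cons.mp hq with rfl | hq'
      · exact hxa
      · have := hp.1 q hq'
        rcases this with h | ⟨h, _⟩
        · exact lt_trans hxa h
        · exact h ▸ hxa

theorem runs_spec :
    ∀ (Q : List (String × String)), Q.Pairwise pvLexLe →
      ∃ K : List String, K.Pairwise (· < ·) ∧ (∀ m, m ∈ K ↔ m ∈ Q.map Prod.fst) ∧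
        pvRuns Q = K.map (fun m => (m, (Q.filter (fun p => p.1 == m)).map Prod.snd)) := by
  intro Q
  induction Q using pvRuns.induct with
  | case1 =>
    intro _
    exact ⟨[], List.Pairwise.nil, by simp, by simp [pvRuns]⟩
  | case2 p rest ih =>
    intro hp
    rw [List.pairwise_cons] at hp
    obtain ⟨hhead, htail⟩ := hp
    have hble : ∀ q ∈ rest, p.1 ≤ q.1 := by
      intro q hq
      rcases hhead q hq with h | ⟨h, _⟩
      · exact le_of_lt h
      · exact le_of_eq h
    have hrp : (rest.dropWhile (fun q => q.1 == p.1)).Pairwise pvLexLe :=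
      List.Pairwise.sublist (List.dropWhile_sublist _) htail
    have hrlt : ∀ q ∈ rest.dropWhile (fun q => q.1 == p.1), p.1 < q.1 :=
      fst_lt_of_mem_dropWhile p.1 rest hble htail
    obtain ⟨K', hK'lt, hK'mem, hK'eq⟩ := ih hrp
    have hK'gt : ∀ m ∈ K', p.1 < m := by
      intro m hm
      rcases List.mem_map.mp ((hK'mem m).mp hm) with ⟨q, hq, rfl⟩
      exact hrlt q hq
    refine ⟨p.1 :: K', ?_, ?_, ?_⟩
    · exact List.Pairwise.cons hK'gt hK'lt
    · intro m
      constructor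
      · intro hm
        rcases List.mem_cons.mp hm with rfl | hm'
        · exact List.mem_map.mpr ⟨p, List.mem_cons_self, rfl⟩
        · rcases List.mem_map.mp ((hK'mem m).mp hm') with ⟨q, hq, rfl⟩
          exact List.mem_map.mpr ⟨q, List.mem_cons_of_mem p ((List.dropWhile_sublist _).mem hq), rfl⟩
      · intro hm
        rcases List.mem_map.mp hm with ⟨q, hq, rfl⟩
        rcases List.mem_cons.mp hq with rfl | hq'
        · exact List.mem_cons_self
        · -- q is in takeWhile part (fst = p.1) or in dropWhile part (fst ∈ K')
          have hsplit : q ∈ rest.takeWhile (fun r => r.1 == p.1)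
              ∨ q ∈ rest.dropWhile (fun r => r.1 == p.1) := by
            have : q ∈ rest.takeWhile (fun r => r.1 == p.1)
                ++ rest.dropWhile (fun r => r.1 == p.1) := by
              rw [List.takeWhile_append_dropWhile]; exact hq'
            exact List.mem_append.mp this
          rcases hsplit with h | h
          · have h0 := List.mem_takeWhile_imp h
            have h1 : q.1 = p.1 := by simpa using h0
            exact h1 ▸ List.mem_cons_self
          · exact List.mem_cons_of_mem _ ((hK'mem q.1).mpr (List.mem_map.mpr ⟨q, h, rfl⟩))
    · -- the list equality
      have htk := fun (q : String × String)
        (hq : q ∈ rest.takeWhile (fun r : String × String => r.1 == p.1)) =>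
          List.mem_takeWhile_imp hq
      have hfilter_self :
          ((p :: rest).filter (fun r => r.1 == p.1))
            = p :: rest.takeWhile (fun r => r.1 == p.1) := by
        rw [List.filter_cons_of_pos (by simp)]
        congr 1
        conv_lhs => rw [← List.takeWhile_append_dropWhile (p := fun r : String × String => r.1 == p.1) (l := rest)]
        rw [List.filter_append]
        have h1 : (rest.takeWhile (fun r => r.1 == p.1)).filter (fun r => r.1 == p.1)
            = rest.takeWhile (fun r => r.1 == p.1) :=
          List.filter_eq_self.mpr htk
        have h2 : (rest.dropWhile (fun r => r.1 == p.1)).filter (fun r => r.1 == p.1) = [] := by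
          apply List.filter_eq_nil_iff.mpr
          intro q hq
          have h := hrlt q hq
          simp only [beq_iff_eq]
          exact ne_of_gt h
        rw [h1, h2, List.append_nil]
      have hfilter_other : ∀ m ∈ K',
          ((p :: rest).filter (fun r => r.1 == m))
            = (rest.dropWhile (fun r => r.1 == p.1)).filter (fun r => r.1 == m) := by
        intro m hm
        have hpm : p.1 ≠ m := ne_of_lt (hK'gt m hm)
        rw [List.filter_cons_of_neg (by simp [hpm])]
        conv_lhs => rw [← List.takeWhile_append_dropWhile (p := fun r : String × String => r.1 == p.1) (l := rest)]
        rw [List.filter_append]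
        have h1 : (rest.takeWhile (fun r => r.1 == p.1)).filter (fun r => r.1 == m) = [] := by
          apply List.filter_eq_nil_iff.mpr
          intro q hq
          have hq1 : q.1 = p.1 := by simpa using htk q hq
          simp only [beq_iff_eq]
          rw [hq1]; exact hpm
        rw [h1, List.nil_append]
      rw [pvRuns, List.map_cons]
      congr 1
      · rw [hfilter_self, List.map_cons]
      · rw [hK'eq]
        apply List.map_congr_left
        intro m hm
        rw [hfilter_other m hm]

-- A's dict of groups, characterised: keys = first occurrences of the modules, value = names in input order
theorem A_items (nodes : List String) :
    (nodes.foldl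
      (fun d n => PySem.Dict.modify d (pvSplitA n).1 [] (fun v => v ++ [(pvSplitA n).2]))
      PySem.Dict.empty).items
    = (PySem.Set.ofList ((nodes.map pvSplitA).map Prod.fst)).map
        (fun m => (m, (((nodes.map pvSplitA).filter (fun p => p.1 == m)).map Prod.snd))) := by
  set d := nodes.foldl
      (fun d n => PySem.Dict.modify d (pvSplitA n).1 [] (fun v => v ++ [(pvSplitA n).2]))
      PySem.Dict.empty with hd
  have hkeys : d.keys = PySem.Set.ofList ((nodes.map pvSplitA).map Prod.fst) := by
    rw [hd]
    rw [PySem.Dict.keys_foldl_modify_key nodes (fun n => (pvSplitA n).1) []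
      (fun d n => fun v => v ++ [(pvSplitA n).2]) PySem.Dict.empty]
    rw [List.map_map]
    rfl
  have hnodup : d.keys.Nodup := by
    rw [hkeys]; exact PySem.Set.nodup_ofList _
  have hfold : d = (nodes.map pvSplitA).foldl
      (fun d p => PySem.Dict.modify d p.1 [] (fun v => v ++ [p.2])) PySem.Dict.empty := by
    rw [hd, List.foldl_map]
  have hgetD : ∀ m, d.getD m []
      = ((nodes.map pvSplitA).filter (fun p => p.1 == m)).map Prod.snd := by
    intro m
    rw [hfold, PySem.Dict.getD_foldl_modify_append]
    simp [PySem.Dict.getD_empty]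
  rw [PySem.Dict.items_eq_map_keys d hnodup []]
  rw [hkeys]
  apply List.map_congr_left
  intro m _
  rw [hgetD m]

-- B's per-module name list is exactly A's sorted name list
theorem names_sorted (P : List (String × String)) (m : String)
    (hQpair : (PySem.List.sorted2 P (fun p => p.1) (fun p => p.2)).Pairwise pvLexLe) :
    ((PySem.List.sorted2 P (fun p => p.1) (fun p => p.2)).filter
        (fun p => p.1 == m)).map Prod.snd
      = PySem.List.sorted ((P.filter (fun p => p.1 == m)).map Prod.snd) (fun x => x) := by
  set Q := PySem.List.sorted2 P (fun p : String × String => p.1) (fun p => p.2) with hQ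
  have hperm : Q.Perm P := PySem.List.sorted2_perm P _ _ _
  apply PySem.List.eq_of_perm_of_pairwise_le_of_injective (fun x : String => x)
    (fun a b h => h)
  · exact ((hperm.filter _).map _).trans (PySem.List.sorted_perm ..).symm
  · apply List.pairwise_map.mpr
    have hfp : (Q.filter (fun p => p.1 == m)).Pairwise pvLexLe := hQpair.filter _
    refine hfp.imp_of_mem ?_
    intro a b ha hb hab
    have ham : a.1 = m := by simpa using (List.mem_filter.mp ha).2
    have hbm : b.1 = m := by simpa using (List.mem_filter.mp hb).2
    rcases hab with h | ⟨_, h⟩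
    · rw [ham, hbm] at h; exact absurd h (lt_irrefl m)
    · exact h
  · have := PySem.List.sorted_pairwise ((P.filter (fun p => p.1 == m)).map Prod.snd)
      (fun x : String => x)
    exact this

theorem main_eq (nodes : List String) :
    group_nodes_by_module_py nodes = group_nodes_by_module_py_alt nodes := by
  unfold group_nodes_by_module_py group_nodes_by_module_py_alt
  rw [pvSplitB_eq]
  show PySem.List.sorted
      (PySem.Dict.mk
        (((nodes.foldl
          (fun d n => PySem.Dict.modify d (pvSplitA n).1 [] (fun v => v ++ [(pvSplitA n).2]))
          PySem.Dict.empty).items).map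
            (fun p => (p.1, PySem.List.sorted p.2 (fun x => x))))).items (fun p => p.1)
    = pvRuns (PySem.List.sorted2 (nodes.map pvSplitA) (fun p => p.1) (fun p => p.2))
  set P := nodes.map pvSplitA with hP
  set Q := PySem.List.sorted2 P (fun p : String × String => p.1) (fun p => p.2) with hQ
  have hQpair : Q.Pairwise pvLexLe := sorted2_pairwise_lexle P
  have hQperm : Q.Perm P := PySem.List.sorted2_perm P _ _ _
  obtain ⟨K, hKlt, hKmem, hruns⟩ := runs_spec Q hQpair
  -- B's output as a map over K
  have hB : pvRuns Q = K.map
      (fun m => (m, PySem.List.sorted ((P.filter (fun p => p.1 == m)).map Prod.snd)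
        (fun x => x))) := by
    rw [hruns]
    apply List.map_congr_left
    intro m _
    rw [names_sorted P m hQpair]
  -- A's groups2 items as a map over M₀
  have hA : (PySem.Dict.mk
      (((nodes.foldl
        (fun d n => PySem.Dict.modify d (pvSplitA n).1 [] (fun v => v ++ [(pvSplitA n).2]))
        PySem.Dict.empty).items).map
          (fun p => (p.1, PySem.List.sorted p.2 (fun x => x))))).items
      = (PySem.Set.ofList (P.map Prod.fst)).map
          (fun m => (m, PySem.List.sorted ((P.filter (fun p => p.1 == m)).map Prod.snd)
            (fun x => x))) := by
    show ((nodes.foldl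
        (fun d n => PySem.Dict.modify d (pvSplitA n).1 [] (fun v => v ++ [(pvSplitA n).2]))
        PySem.Dict.empty).items).map (fun p => (p.1, PySem.List.sorted p.2 (fun x => x)))
      = _
    rw [A_items nodes, List.map_map]
    rfl
  rw [hA, hB]
  -- the final dict(sorted(items)) of A equals B's strictly key-increasing list
  apply PySem.List.sorted_eq_of_perm_of_pairwise_lt
  · -- permutation
    apply List.Perm.map
    have hKnodup : K.Nodup := List.Pairwise.imp (fun h => ne_of_lt h) hKlt
    have hMnodup : (PySem.Set.ofList (P.map Prod.fst)).Nodup := PySem.Set.nodup_ofList _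
    rw [List.perm_ext_iff_of_nodup hKnodup hMnodup]
    intro m
    rw [hKmem m, PySem.Set.mem_ofList]
    exact List.Perm.mem_iff (hQperm.map Prod.fst)
  · -- strictly increasing keys
    apply List.pairwise_map.mpr
    exact hKlt

-- ===== VERDICT (by name: the statement is the Claim_ definition above) =====
theorem group_nodes_by_module_py_spec : Claim_equal_group_nodes_by_module_py := by
  intro nodes _
  unfold Spec_group_nodes_by_module_py
  exact main_eq nodes
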